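-- pv_equiv track=rewrite | github.com/lomik31/kkh | rec_file.py | l_sort
-- ===== SOURCE A (Python) =====
-- def l_sort(sort_massive,idlist,inverse):
--     otnjat=0
--     result_massive=[]
--     for i in range(0,len(sort_massive)):
--         for j in range(0,len(sort_massive)-1):
--             if (not inverse and sort_massive[j]<sort_massive[j+1]):
--                 sort_massive[j],sort_massive[j+1]=sort_massive[j+1],sort_massive[j]
--                 idlist[j],idlist[j+1]=idlist[j+1],idlist[j]
--             elif (inverse and sort_massive[j]>sort_massive[j+1]):
--                 sort_massive[j],sort_massive[j+1]=sort_massive[j+1],sort_massive[j]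
--                 idlist[j],idlist[j+1]=idlist[j+1],idlist[j]
--     result_massive.append([1,idlist[0]])
--     for i in range(1,len(sort_massive)):
--         if (sort_massive[i]==sort_massive[i-1]):
--             if (i-1>=0):
--                 result_massive.append([result_massive[i-1][0],idlist[i]])
--                 otnjat+=1
--             else:
--                 result_massive.append([i-otnjat,idlist[i]])
--         else:
--             result_massive.append([i+1-otnjat,idlist[i]])
--     return result_massive
-- ===== SOURCE B (Python) =====
-- def l_sort(sort_massive, idlist, inverse):
--     n = len(sort_massive)
--     pairs = sorted(zip(sort_massive, idlist), key=lambda p: p[0], reverse=not inverse)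
--     sort_massive[:] = [v for v, _ in pairs]
--     idlist[:n] = [i for _, i in pairs]
--     rank_of = {}
--     for v, _ in pairs:
--         if v not in rank_of:
--             rank_of[v] = len(rank_of) + 1
--     return [[rank_of[v], i] for v, i in pairs]
-- ===== Notes on version B (the rewrite author's own statement) =====
-- stated objective: faster
-- what changed: B replaces A's O(n^2) double-pass bubble sort with one stable library sort of the zipped (value, id) pairs (reassigned in place via slices, so the argument mutation matches), and replaces A's accumulator-carried dense-rank scan ('otnjat') with a value->rank dictionary built from the distinct sorted values and a final map.
-- intended difference: On an empty sort_massive with a nonempty idlist, A returns [[1, idlist[0]]] (a rank for a nonexistent element, an accident of its unconditional first append); B returns [], the intended empty ranking. — e.g. on l_sort([], [7], false): A returns [[1, 7]], B returns []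
import Mathlib
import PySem

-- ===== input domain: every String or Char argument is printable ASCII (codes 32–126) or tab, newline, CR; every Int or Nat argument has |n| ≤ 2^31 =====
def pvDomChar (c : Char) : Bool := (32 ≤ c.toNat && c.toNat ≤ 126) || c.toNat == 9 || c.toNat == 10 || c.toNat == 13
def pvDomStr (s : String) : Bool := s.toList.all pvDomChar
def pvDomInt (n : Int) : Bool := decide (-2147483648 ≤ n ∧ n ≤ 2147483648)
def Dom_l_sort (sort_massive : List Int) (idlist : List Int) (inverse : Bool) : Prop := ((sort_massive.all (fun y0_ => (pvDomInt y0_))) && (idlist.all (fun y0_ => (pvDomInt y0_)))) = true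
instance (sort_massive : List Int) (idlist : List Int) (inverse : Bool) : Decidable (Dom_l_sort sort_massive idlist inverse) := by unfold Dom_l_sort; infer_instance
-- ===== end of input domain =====

-- B replaces A's quadratic bubble sort by one stable library sort of the zipped pairs and A's
-- `otnjat` accumulator scan by a value→dense-rank dictionary plus a map (objective: faster).
-- Both A and B mutate sort_massive/idlist in place identically; the equivalence proved here is
-- about the RETURN value.

-- ===== PORT A =====
-- one inner-loop step of A's bubble sort: compares positions j and j+1 and swaps in both lists.
-- All indices touched are in range under Pre_l_sort, so the `getD` defaults are never used there.
def lsStep (inverse : Bool) (st : List Int × List Int) (j : Nat) : List Int × List Int :=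
  let sm := st.1
  let il := st.2
  if !inverse && decide (sm.getD j 0 < sm.getD (j+1) 0) then
    ((sm.set j (sm.getD (j+1) 0)).set (j+1) (sm.getD j 0),
     (il.set j (il.getD (j+1) 0)).set (j+1) (il.getD j 0))
  else if inverse && decide (sm.getD j 0 > sm.getD (j+1) 0) then
    ((sm.set j (sm.getD (j+1) 0)).set (j+1) (sm.getD j 0),
     (il.set j (il.getD (j+1) 0)).set (j+1) (il.getD j 0))
  else st

def l_sort (sort_massive : List Int) (idlist : List Int) (inverse : Bool) : List (List Int) :=
  let n := sort_massive.length
  let st := (List.range n).foldl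
      (fun st _ => (List.range (n-1)).foldl (lsStep inverse) st) (sort_massive, idlist)
  let sm := st.1
  let il := st.2
  let result0 : List (List Int) := [[1, il.getD 0 0]]
  let fin := (List.range (n-1)).foldl (fun (acc : List (List Int) × Int) t =>
      let i := t + 1
      let res := acc.1
      let otnjat := acc.2
      if sm.getD i 0 = sm.getD (i-1) 0 then
        if (i : Int) - 1 ≥ 0 then
          (res ++ [[(res.getD (i-1) []).getD 0 0, il.getD i 0]], otnjat + 1)
        else
          (res ++ [[(i : Int) - otnjat, il.getD i 0]], otnjat)
      else
        (res ++ [[(i : Int) + 1 - otnjat, il.getD i 0]], otnjat)) (result0, 0)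
  fin.1

-- ===== PORT B =====
def l_sort_alt (sort_massive : List Int) (idlist : List Int) (inverse : Bool) : List (List Int) :=
  let pairs := PySem.List.sorted (sort_massive.zip idlist) (fun p => p.1) (!inverse)
  -- (Source B's slice assignments write the sorted columns back into the arguments; return value only here)
  let rank_of : PySem.Dict Int Int := pairs.foldl (fun d p =>
      if !(PySem.Dict.contains d p.1) then PySem.Dict.insert d p.1 ((PySem.Dict.size d : Int) + 1)
      else d) PySem.Dict.empty
  -- rank_of[v]: every key of the comprehension is present, so getD's default is never used
  pairs.map (fun p => [PySem.Dict.getD rank_of p.1 0, p.2])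

-- ===== PRECONDITION & SPEC =====
-- A raises IndexError iff idlist is empty (idlist[0]) or idlist is shorter than sort_massive
-- (an index beyond idlist is read or swapped); Pre_ excludes exactly those inputs.
def Pre_l_sort (sort_massive : List Int) (idlist : List Int) (inverse : Bool) : Prop :=
  idlist ≠ [] ∧ sort_massive.length ≤ idlist.length
instance (sort_massive : List Int) (idlist : List Int) (inverse : Bool) : Decidable (Pre_l_sort sort_massive idlist inverse) := by unfold Pre_l_sort; infer_instance

def pvWitness_l_sort : List Int × List Int × Bool := ([3, 1, 2, 1], [10, 20, 30, 40], false)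

-- On an empty sort_massive with a nonempty idlist, A returns [[1, idlist[0]]] — a rank for an
-- element that does not exist, an accident of its unconditional first append — while B returns
-- the intended empty ranking [].
def D_l_sort (sort_massive : List Int) (idlist : List Int) (inverse : Bool) : Prop :=
  sort_massive = []
instance (sort_massive : List Int) (idlist : List Int) (inverse : Bool) : Decidable (D_l_sort sort_massive idlist inverse) := by unfold D_l_sort; infer_instance

def Spec_l_sort (sort_massive : List Int) (idlist : List Int) (inverse : Bool) (out : List (List Int)) : Prop := ¬ D_l_sort sort_massive idlist inverse → out = l_sort_alt sort_massive idlist inverse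
instance (sort_massive : List Int) (idlist : List Int) (inverse : Bool) (out : List (List Int)) : Decidable (Spec_l_sort sort_massive idlist inverse out) := by unfold Spec_l_sort; infer_instance

def pvDiffWitness_l_sort : List Int × List Int × Bool := ([], [7], false)
def pvDiffWitnessOut_l_sort : (List (List Int)) × (List (List Int)) := ([[1, 7]], [])

-- ===== CLAIM (what is proved, stated in full; the proofs are below) =====
def Claim_unchanged_l_sort : Prop := ∀ (sort_massive : List Int) (idlist : List Int) (inverse : Bool), Dom_l_sort sort_massive idlist inverse → Pre_l_sort sort_massive idlist inverse → Spec_l_sort sort_massive idlist inverse (l_sort sort_massive idlist inverse)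

def Claim_changed_l_sort : Prop := Dom_l_sort (pvDiffWitness_l_sort.1) (pvDiffWitness_l_sort.2.1) (pvDiffWitness_l_sort.2.2) ∧ Pre_l_sort (pvDiffWitness_l_sort.1) (pvDiffWitness_l_sort.2.1) (pvDiffWitness_l_sort.2.2) ∧ D_l_sort (pvDiffWitness_l_sort.1) (pvDiffWitness_l_sort.2.1) (pvDiffWitness_l_sort.2.2) ∧ l_sort (pvDiffWitness_l_sort.1) (pvDiffWitness_l_sort.2.1) (pvDiffWitness_l_sort.2.2) = pvDiffWitnessOut_l_sort.1 ∧ l_sort_alt (pvDiffWitness_l_sort.1) (pvDiffWitness_l_sort.2.1) (pvDiffWitness_l_sort.2.2) = pvDiffWitnessOut_l_sort.2 ∧ pvDiffWitnessOut_l_sort.1 ≠ pvDiffWitnessOut_l_sort.2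

def Claim_exact_l_sort : Prop := ∀ (sort_massive : List Int) (idlist : List Int) (inverse : Bool), Dom_l_sort sort_massive idlist inverse → Pre_l_sort sort_massive idlist inverse → D_l_sort sort_massive idlist inverse → l_sort sort_massive idlist inverse ≠ l_sort_alt sort_massive idlist inverse

-- ===== LEMMAS AND PROOFS =====

-- ---- Phase 1: A's index-based double loop = iterated pair-level bubble sweeps ----

def pvCnd (inverse : Bool) (a b : Int × Int) : Bool :=
  (!inverse && decide (a.1 < b.1)) || (inverse && decide (a.1 > b.1))

def pvSweep {α : Type} (c : α → α → Bool) : List α → List α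
  | [] => []
  | [a] => [a]
  | a :: b :: t => if c a b then b :: pvSweep c (a :: t) else a :: pvSweep c (b :: t)

def pvIter {α : Type} (f : α → α) : Nat → α → α
  | 0, x => x
  | k+1, x => pvIter f k (f x)

def pvPstep (inverse : Bool) (z : List (Int × Int)) (j : Nat) : List (Int × Int) :=
  if pvCnd inverse (z.getD j (0,0)) (z.getD (j+1) (0,0)) then
    (z.set j (z.getD (j+1) (0,0))).set (j+1) (z.getD j (0,0))
  else z
-- step at index |u| on u ++ (a :: b :: t)
lemma pvPstep_at (inv : Bool) (u : List (Int × Int)) (a b : Int × Int) (t : List (Int × Int)) :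
    pvPstep inv (u ++ a :: b :: t) u.length
      = u ++ (if pvCnd inv a b then b :: a :: t else a :: b :: t) := by
  have hga : (u ++ a :: b :: t).getD u.length (0,0) = a := by
    simp [List.getD_append_right, List.getD]
  have hgb : (u ++ a :: b :: t).getD (u.length + 1) (0,0) = b := by
    simp [List.getD]
  unfold pvPstep
  rw [hga, hgb]
  split
  · rw [List.set_append_right _ _ (by omega), List.set_append_right _ _ (by omega)]
    simp [List.set]
  · rfl

lemma pvFold_range' (inv : Bool) :
    ∀ (w u : List (Int × Int)),
      (List.range' u.length (w.length - 1)).foldl (pvPstep inv) (u ++ w)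
        = u ++ pvSweep (pvCnd inv) w := by
  intro w
  induction w using pvSweep.induct (c := pvCnd inv) with
  | case1 => intro u; simp [pvSweep]
  | case2 a => intro u; simp [pvSweep]
  | case3 a b t hc ih =>
      intro u
      have hlen : (a :: b :: t).length - 1 = (t.length + 1) := by simp
      rw [hlen, List.range'_succ, List.foldl_cons, pvPstep_at, if_pos hc]
      have := ih (u ++ [b])
      simp only [List.length_append, List.length_cons, List.length_nil] at this ⊢
      simpa [pvSweep, hc, List.append_assoc] using this
  | case4 a b t hc ih =>
      intro u
      have hlen : (a :: b :: t).length - 1 = (t.length + 1) := by simp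
      rw [hlen, List.range'_succ, List.foldl_cons, pvPstep_at, if_neg (by simpa using hc)]
      have := ih (u ++ [a])
      simp only [List.length_append, List.length_cons, List.length_nil] at this ⊢
      simpa [pvSweep, hc, List.append_assoc] using this

lemma pvFold_range (inv : Bool) (z : List (Int × Int)) :
    (List.range (z.length - 1)).foldl (pvPstep inv) z = pvSweep (pvCnd inv) z := by
  have := pvFold_range' inv z []
  simpa [List.range_eq_range'] using this
lemma pvMapGetD {α β : Type} [Inhabited β] (f : α → β) (z : List α) (j : Nat) (d : α) (hj : j < z.length) :
    (z.map f).getD j (f d) = f (z.getD j d) := by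
  simp [List.getD_eq_getElem, hj, List.getD]

lemma lsStep_repr (inv : Bool) (z : List (Int × Int)) (rest : List Int) (j : Nat)
    (hj : j + 1 < z.length) :
    lsStep inv (z.map Prod.fst, z.map Prod.snd ++ rest) j
      = ((pvPstep inv z j).map Prod.fst, (pvPstep inv z j).map Prod.snd ++ rest) := by
  have hj0 : j < z.length := by omega
  have h1 : (z.map Prod.fst).getD j 0 = (z.getD j (0,0)).1 := by
    simpa using pvMapGetD Prod.fst z j (0,0) hj0
  have h2 : (z.map Prod.fst).getD (j+1) 0 = (z.getD (j+1) (0,0)).1 := by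
    simpa using pvMapGetD Prod.fst z (j+1) (0,0) hj
  have h3 : (z.map Prod.snd ++ rest).getD j 0 = (z.getD j (0,0)).2 := by
    rw [List.getD_append _ _ _ _ (by simpa using hj0)]
    simpa using pvMapGetD Prod.snd z j (0,0) hj0
  have h4 : (z.map Prod.snd ++ rest).getD (j+1) 0 = (z.getD (j+1) (0,0)).2 := by
    rw [List.getD_append _ _ _ _ (by simpa using hj)]
    simpa using pvMapGetD Prod.snd z (j+1) (0,0) hj
  have hsetf : ∀ (v : Int × Int) (k : Nat) (w : List (Int × Int)),
      (w.map Prod.fst).set k v.1 = (w.set k v).map Prod.fst := by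
    intro v k w; simp [List.map_set]
  have hsets : ∀ (v : Int × Int) (k : Nat) (w : List (Int × Int)),
      (w.map Prod.snd).set k v.2 ++ rest = (w.set k v).map Prod.snd ++ rest := by
    intro v k w; simp [List.map_set]
  have hset_append : ∀ (k : Nat) (v : Int) (w : List Int), k < w.length →
      (w ++ rest).set k v = w.set k v ++ rest := by
    intro k v w hk; rw [List.set_append]; simp [hk]
  simp only [lsStep, pvPstep, pvCnd, h1, h2, h3, h4]
  by_cases hinv : inv
  · subst hinv
    simp only [Bool.not_true, Bool.false_and, Bool.true_and, decide_eq_true_eq, if_false,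
      Bool.false_eq_true, gt_iff_lt]
    split
    next h =>
      rw [hset_append _ _ _ (by simpa using hj0), hset_append _ _ _ (by simp; omega),
        if_pos (by simpa using h)]
      simp [Prod.mk.injEq, List.map_set]
    next h =>
      rw [if_neg (by simpa using h)]
  · simp only [hinv, Bool.not_false, Bool.true_and, Bool.false_and, decide_eq_true_eq,
      Bool.false_eq_true, if_false]
    split
    next h =>
      rw [hset_append _ _ _ (by simpa using hj0), hset_append _ _ _ (by simp; omega),
        if_pos (by simpa using h)]
      simp [Prod.mk.injEq, List.map_set]
    next h =>
      rw [if_neg (by simpa using h)]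
def pvR {α : Type} (K : α → Int) (x y : Int × α) : Prop :=
  K x.2 < K y.2 ∨ (K x.2 = K y.2 ∧ x.1 < y.1)

def pvStab {α : Type} (K : α → Int) (l : List (Int × α)) : Prop :=
  l.Pairwise (fun x y => K x.2 = K y.2 → x.1 < y.1)

-- decorated / undecorated swap conditions
def pvCD {α : Type} (K : α → Int) (x y : Int × α) : Bool := decide (K y.2 < K x.2)
def pvCU {α : Type} (K : α → Int) (a b : α) : Bool := decide (K b < K a)

lemma pvR_trans {α : Type} (K : α → Int) {x y z : Int × α} :
    pvR K x y → pvR K y z → pvR K x z := by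
  rintro (h | ⟨h1, h2⟩) (h' | ⟨h1', h2'⟩) <;> unfold pvR <;> [left; left; left; right] <;> omega

lemma pvSweep_perm {α : Type} (c : α → α → Bool) (l : List α) : (pvSweep c l).Perm l := by
  induction l using pvSweep.induct (c := c) with
  | case1 => simp [pvSweep]
  | case2 a => simp [pvSweep]
  | case3 a b t hc ih =>
      simp only [pvSweep, hc, if_true]
      exact (ih.cons b).trans (List.Perm.swap a b t)
  | case4 a b t hc ih =>
      simp only [pvSweep, hc, if_false, Bool.false_eq_true]
      exact ih.cons a

lemma pvMem_sweep {α : Type} (c : α → α → Bool) (l : List α) (x : α) :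
    x ∈ pvSweep c l ↔ x ∈ l := (pvSweep_perm c l).mem_iff

lemma pvLength_sweep {α : Type} (c : α → α → Bool) (l : List α) :
    (pvSweep c l).length = l.length := (pvSweep_perm c l).length_eq

lemma pvStab_sweep {α : Type} (K : α → Int) (l : List (Int × α)) (h : pvStab K l) :
    pvStab K (pvSweep (pvCD K) l) := by
  induction l using pvSweep.induct (c := pvCD K) with
  | case1 => simpa [pvSweep] using h
  | case2 a => simpa [pvSweep] using h
  | case3 a b t hc ih =>
      simp only [pvSweep, hc, if_true]
      rcases List.pairwise_cons.mp h with ⟨ha, h'⟩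
      rcases List.pairwise_cons.mp h' with ⟨hb, ht⟩
      have hab : K b.2 < K a.2 := by simpa [pvCD] using hc
      have hstab_at : pvStab K (a :: t) := by
        refine List.pairwise_cons.mpr ⟨?_, ht⟩
        intro y hy; exact ha y (List.mem_cons_of_mem b hy)
      refine List.pairwise_cons.mpr ⟨?_, ih hstab_at⟩
      intro y hy heq
      rcases List.mem_cons.mp ((pvMem_sweep _ _ _).mp hy) with heqy | hy'
      · subst heqy; omega
      · exact hb y hy' heq
  | case4 a b t hc ih =>
      simp only [pvSweep, hc, if_false, Bool.false_eq_true]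
      rcases List.pairwise_cons.mp h with ⟨ha, h'⟩
      refine List.pairwise_cons.mpr ⟨?_, ih h'⟩
      intro y hy heq
      exact ha y ((pvMem_sweep _ _ _).mp hy) heq

lemma pvSweep_last {α : Type} (K : α → Int) (l : List (Int × α)) (hne : l ≠ [])
    (hst : pvStab K l) :
    ∃ u M, pvSweep (pvCD K) l = u ++ [M] ∧ (∀ x ∈ u, pvR K x M) ∧
      (∀ x ∈ l, x = M ∨ pvR K x M) := by
  induction l using pvSweep.induct (c := pvCD K) with
  | case1 => exact absurd rfl hne
  | case2 a =>
      exact ⟨[], a, by simp [pvSweep], by simp, by simp⟩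
  | case3 a b t hc ih =>
      rcases List.pairwise_cons.mp hst with ⟨ha, h'⟩
      rcases List.pairwise_cons.mp h' with ⟨hb, ht⟩
      have hab : K b.2 < K a.2 := by simpa [pvCD] using hc
      have hstab_at : pvStab K (a :: t) := by
        refine List.pairwise_cons.mpr ⟨?_, ht⟩
        intro y hy; exact ha y (List.mem_cons_of_mem b hy)
      rcases ih (by simp) hstab_at with ⟨u, M, heq, hu, hmax⟩
      have hba : pvR K b a := Or.inl hab
      have hbM : pvR K b M := by
        rcases hmax a (by simp) with rfl | h
        · exact hba
        · exact pvR_trans K hba h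
      refine ⟨b :: u, M, by simp [pvSweep, hc, heq], ?_, ?_⟩
      · intro x hx
        rcases List.mem_cons.mp hx with heqx | hx
        · subst heqx; exact hbM
        · exact hu x hx
      · intro x hx
        rcases List.mem_cons.mp hx with heqx | hx
        · subst heqx; exact hmax _ (by simp)
        · rcases List.mem_cons.mp hx with heqx | hx
          · subst heqx; exact Or.inr hbM
          · exact hmax x (by simp [hx])
  | case4 a b t hc ih =>
      rcases List.pairwise_cons.mp hst with ⟨ha, h'⟩
      have hab : pvR K a b := by
        have : ¬ (K b.2 < K a.2) := by simpa [pvCD] using hc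
        rcases lt_or_eq_of_le (le_of_not_gt this) with h | h
        · exact Or.inl h
        · exact Or.inr ⟨h, ha b (by simp) h⟩
      rcases ih (by simp) h' with ⟨u, M, heq, hu, hmax⟩
      have haM : pvR K a M := by
        rcases hmax b (by simp) with rfl | h
        · exact hab
        · exact pvR_trans K hab h
      refine ⟨a :: u, M, by simp [pvSweep, hc, heq], ?_, ?_⟩
      · intro x hx
        rcases List.mem_cons.mp hx with heqx | hx
        · subst heqx; exact haM
        · exact hu x hx
      · intro x hx
        rcases List.mem_cons.mp hx with heqx | hx
        · subst heqx; exact Or.inr haM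
        · exact hmax x hx

lemma pvSweep_frozen {α : Type} (K : α → Int) (M : Int × α) :
    ∀ (w : List (Int × α)), (∀ x ∈ w, pvR K x M) →
      pvSweep (pvCD K) (w ++ [M]) = pvSweep (pvCD K) w ++ [M] := by
  intro w
  induction w using pvSweep.induct (c := pvCD K) with
  | case1 => intro _; simp [pvSweep]
  | case2 a =>
      intro h
      have : ¬ (K M.2 < K a.2) := by
        rcases h a (by simp) with h' | ⟨h', _⟩ <;> omega
      simp [pvSweep, pvCD, this]
  | case3 a b t hc ih =>
      intro h
      have hrec := ih (fun x hx => h x (by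
        rcases List.mem_cons.mp hx with heqx | hx
        · subst heqx; simp
        · simp [hx]))
      simp only [List.cons_append] at hrec ⊢
      simp [pvSweep, hc, hrec]
  | case4 a b t hc ih =>
      intro h
      have hrec := ih (fun x hx => h x (by
        rcases List.mem_cons.mp hx with heqx | hx
        · subst heqx; simp
        · simp [hx]))
      simp only [List.cons_append] at hrec ⊢
      simp [pvSweep, hc, hrec]

lemma pvIter_perm {α : Type} (c : α → α → Bool) (k : Nat) (l : List α) :
    (pvIter (pvSweep c) k l).Perm l := by
  induction k generalizing l with
  | zero => simp [pvIter]
  | succ k ih => exact (ih (pvSweep c l)).trans (pvSweep_perm c l)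

lemma pvIter_frozen {α : Type} (K : α → Int) (M : Int × α) (k : Nat) :
    ∀ (w : List (Int × α)), (∀ x ∈ w, pvR K x M) →
      pvIter (pvSweep (pvCD K)) k (w ++ [M]) = pvIter (pvSweep (pvCD K)) k w ++ [M] := by
  induction k with
  | zero => intro w _; rfl
  | succ k ih =>
      intro w h
      show pvIter _ k (pvSweep (pvCD K) (w ++ [M])) = _
      rw [pvSweep_frozen K M w h]
      exact ih _ (fun x hx => h x ((pvMem_sweep _ _ _).mp hx))

lemma pvBubble_sorted {α : Type} (K : α → Int) :
    ∀ (n : Nat) (l : List (Int × α)), l.length ≤ n → pvStab K l →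
      (pvIter (pvSweep (pvCD K)) n l).Pairwise (pvR K) := by
  intro n
  induction n with
  | zero =>
      intro l hl _
      have : l = [] := List.length_eq_zero_iff.mp (by omega)
      subst this; simp [pvIter]
  | succ n ih =>
      intro l hl hst
      rcases eq_or_ne l [] with rfl | hne
      · have : ∀ k, pvIter (pvSweep (pvCD K)) k ([] : List (Int × α)) = [] := by
          intro k; induction k with
          | zero => rfl
          | succ k ih' => simpa [pvIter, pvSweep] using ih'
        simp [pvIter, pvSweep, this n]
      · rcases pvSweep_last K l hne hst with ⟨u, M, heq, hu, _⟩
        show (pvIter (pvSweep (pvCD K)) n (pvSweep (pvCD K) l)).Pairwise (pvR K)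
        rw [heq, pvIter_frozen K M n u hu]
        have hlen : u.length ≤ n := by
          have := pvLength_sweep (pvCD K) l
          rw [heq] at this; simp at this; omega
        have hstu : pvStab K u := by
          have := pvStab_sweep K l hst
          rw [heq] at this
          exact (List.pairwise_append.mp this).1
        have hps := ih u hlen hstu
        rw [List.pairwise_append]
        refine ⟨hps, by simp, ?_⟩
        intro x hx y hy
        simp at hy; subst hy
        exact hu x ((pvIter_perm _ n u).mem_iff.mp hx)
-- enumerate cons

-- projection of a sweep
lemma pvSweep_map {α : Type} (K : α → Int) (l : List (Int × α)) :
    (pvSweep (pvCD K) l).map Prod.snd = pvSweep (pvCU K) (l.map Prod.snd) := by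
  induction l using pvSweep.induct (c := pvCD K) with
  | case1 => simp [pvSweep]
  | case2 a => simp [pvSweep]
  | case3 a b t hc ih =>
      have hc' : pvCU K a.2 b.2 = true := hc
      simp [pvSweep, hc, hc', ih]
  | case4 a b t hc ih =>
      have hc' : pvCU K a.2 b.2 = false := by simpa [pvCD, pvCU] using hc
      simp [pvSweep, hc, hc', ih]

lemma pvIter_map {α : Type} (K : α → Int) (k : Nat) (l : List (Int × α)) :
    (pvIter (pvSweep (pvCD K)) k l).map Prod.snd = pvIter (pvSweep (pvCU K)) k (l.map Prod.snd) := by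
  induction k generalizing l with
  | zero => rfl
  | succ k ih => simpa [pvIter, pvSweep_map] using ih (pvSweep (pvCD K) l)

-- the integer encoding of the lexicographic (key, index) order
def pvEnc {α : Type} (K : α → Int) (n : Int) (x : Int × α) : Int := K x.2 * (n+1) + x.1

lemma pvEnc_lt {α : Type} (K : α → Int) (n : Int) {x y : Int × α}
    (hx : 0 ≤ x.1 ∧ x.1 ≤ n) (hy : 0 ≤ y.1 ∧ y.1 ≤ n) :
    pvEnc K n x < pvEnc K n y ↔ pvR K x y := by
  unfold pvEnc pvR
  rcases lt_trichotomy (K x.2) (K y.2) with h | h | h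
  · have h1 : K x.2 + 1 ≤ K y.2 := h
    have := mul_le_mul_of_nonneg_right h1 (by omega : (0:Int) ≤ n+1)
    constructor
    · intro _; exact Or.inl h
    · intro _; nlinarith
  · constructor
    · intro hlt; rw [h] at hlt; exact Or.inr ⟨h, by omega⟩
    · rintro (h' | ⟨_, h'⟩)
      · omega
      · rw [h]; omega
  · have h1 : K y.2 + 1 ≤ K x.2 := h
    have := mul_le_mul_of_nonneg_right h1 (by omega : (0:Int) ≤ n+1)
    constructor
    · intro hlt; nlinarith
    · rintro (h' | ⟨h', _⟩) <;> omega

-- insertBy transfer: inserting the freshest (largest-index) element commutes with projection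
lemma pvInsert_transfer {α : Type} (K : α → Int) (n : Int) (x : α) (s : Int)
    (hs : 0 ≤ s) (hsn : s ≤ n) :
    ∀ (accD : List (Int × α)), (∀ p ∈ accD, 0 ≤ p.1 ∧ p.1 < s) →
      (PySem.List.insertBy (fun a b => decide (pvEnc K n a < pvEnc K n b)) (s, x) accD).map Prod.snd
        = PySem.List.insertBy (fun a b => decide (K a < K b)) x (accD.map Prod.snd)
      ∧ ∀ p ∈ (PySem.List.insertBy (fun a b => decide (pvEnc K n a < pvEnc K n b)) (s, x) accD),
          0 ≤ p.1 ∧ p.1 < s + 1 := by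
  intro accD
  induction accD with
  | nil => intro _; simp [PySem.List.insertBy]; omega
  | cons q qs ih =>
      intro hb
      have hq := hb q (by simp)
      have hcond : decide (pvEnc K n (s, x) < pvEnc K n q) = decide (K x < K q.2) := by
        have := pvEnc_lt K n (x := (s,x)) (y := q) (by simp; omega) (by constructor <;> omega)
        simp only [decide_eq_decide, this]
        unfold pvR
        constructor
        · rintro (h | ⟨h, hlt⟩)
          · exact h
          · simp at hlt; omega
        · intro h; exact Or.inl h
      rcases ih (fun p hp => hb p (by simp [hp])) with ⟨ih1, ih2⟩
      by_cases h : K x < K q.2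
      · simp only [PySem.List.insertBy, hcond, h, decide_true, if_true, List.map_cons]
        refine ⟨by simp, ?_⟩
        intro p hp
        rcases List.mem_cons.mp hp with heq | hp
        · subst heq; simp; omega
        · have := hb p hp; omega
      · simp only [PySem.List.insertBy, hcond, h, decide_false, Bool.false_eq_true, if_false,
          List.map_cons, ih1]
        refine ⟨by simp, ?_⟩
        intro p hp
        rcases List.mem_cons.mp hp with heq | hp
        · subst heq; omega
        · exact ih2 p hp

lemma pvFoldl_transfer {α : Type} (K : α → Int) (n : Int) :
    ∀ (zs : List α) (s : Int) (accD : List (Int × α)),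
      0 ≤ s → s + zs.length ≤ n + 1 → (∀ p ∈ accD, 0 ≤ p.1 ∧ p.1 < s) →
      ((PySem.List.enumerate zs s).foldl
          (fun acc x => PySem.List.insertBy (fun a b => decide (pvEnc K n a < pvEnc K n b)) x acc) accD).map Prod.snd
        = zs.foldl (fun acc x => PySem.List.insertBy (fun a b => decide (K a < K b)) x acc) (accD.map Prod.snd) := by
  intro zs
  induction zs with
  | nil => intro s accD _ _ _; simp [PySem.List.enumerate]
  | cons z zs ih =>
      intro s accD hs hub hb
      have hcons : PySem.List.enumerate (z :: zs) s = (s, z) :: PySem.List.enumerate zs (s+1) := by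
        simp [PySem.List.enumerate]
      rw [hcons, List.foldl_cons, List.foldl_cons]
      have hsn : s ≤ n := by simp at hub; omega
      rcases pvInsert_transfer K n z s hs hsn accD hb with ⟨h1, h2⟩
      rw [← h1]
      exact ih (s+1) _ (by omega) (by simp at hub ⊢; omega) h2

-- the master theorem: n bubble passes = Python's stable sorted
theorem pvMaster {α : Type} (K : α → Int) (z : List α) :
    pvIter (pvSweep (pvCU K)) z.length z = PySem.List.sorted z K false := by
  classical
  set n := z.length with hn
  set d := PySem.List.enumerate z 0 with hd
  have hlend : d.length = n := by rw [hd, PySem.List.length_enumerate]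
  have hstab : d.Pairwise (fun x y => K x.2 = K y.2 → x.1 < y.1) := by
    refine List.Pairwise.imp ?_ (PySem.List.pairwise_lt_enumerate z 0)
    intro a b h _
    exact h
  set ds := pvIter (pvSweep (pvCD K)) n d with hds
  have hperm : ds.Perm d := pvIter_perm _ n d
  have hpair : ds.Pairwise (pvR K) := pvBubble_sorted K n d (by omega) hstab
  have hmemd : ∀ p ∈ d, 0 ≤ p.1 ∧ p.1 ≤ (n:Int) - 1 := by
    intro p hp
    rcases (PySem.List.mem_enumerate_iff z 0 p).mp hp with ⟨k, hk, rfl⟩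
    simp; omega
  have hmem : ∀ p ∈ ds, 0 ≤ p.1 ∧ p.1 ≤ ((n:Int) - 1) := fun p hp => hmemd p (hperm.mem_iff.mp hp)
  have hpenc : ds.Pairwise (fun a b => pvEnc K ((n:Int)-1) a < pvEnc K ((n:Int)-1) b) := by
    rw [List.pairwise_iff_getElem] at hpair ⊢
    intro i j hi hj hij
    exact (pvEnc_lt K ((n:Int)-1) (hmem _ (ds.getElem_mem hi)) (hmem _ (ds.getElem_mem hj))).mpr
      (hpair i j hi hj hij)
  have hsorted_d : PySem.List.sorted d (pvEnc K ((n:Int)-1)) false = ds :=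
    PySem.List.sorted_eq_of_perm_of_pairwise_lt d ds _ hperm hpenc
  have htrans := pvFoldl_transfer K ((n:Int)-1) z 0 [] (le_refl 0) (by simp; omega) (by simp)
  calc pvIter (pvSweep (pvCU K)) n z
      = (pvIter (pvSweep (pvCD K)) n d).map Prod.snd := by
        rw [pvIter_map, hd, PySem.List.map_snd_enumerate]
    _ = ds.map Prod.snd := rfl
    _ = (PySem.List.sorted d (pvEnc K ((n:Int)-1)) false).map Prod.snd := by rw [hsorted_d]
    _ = PySem.List.sorted z K false := by
        rw [PySem.List.sorted_eq_foldl_insertBy d, PySem.List.sorted_eq_foldl_insertBy z]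
        simpa [hd] using htrans
-- dedup appending one element
lemma pvDedup_append_singleton (q : List Int) (v : Int) :
    PySem.List.dedup (q ++ [v]) =
      if v ∈ q then PySem.List.dedup q else PySem.List.dedup q ++ [v] := by
  unfold PySem.List.dedup
  rw [PySem.Set.ofList_eq_foldl, List.foldl_append, ← PySem.Set.ofList_eq_foldl]
  simp only [List.foldl_cons, List.foldl_nil]
  unfold PySem.Set.add
  by_cases h : v ∈ q
  · rw [if_pos, if_pos h]
    have : v ∈ PySem.Set.ofList q := by
      rw [← PySem.List.dedup]
      exact (PySem.List.mem_dedup q v).mpr h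
    simpa [PySem.Set.contains] using this
  · rw [if_neg, if_neg h]
    have : v ∉ PySem.Set.ofList q := by
      rw [← PySem.List.dedup]
      exact fun hc => h ((PySem.List.mem_dedup q v).mp hc)
    simpa [PySem.Set.contains] using this

-- dedup of an extension only appends
lemma pvDedup_prefix (q r : List Int) :
    ∃ X, PySem.List.dedup (q ++ r) = PySem.List.dedup q ++ X := by
  induction r using List.reverseRecOn with
  | nil => exact ⟨[], by simp⟩
  | append_singleton r v ih =>
      rcases ih with ⟨X, hX⟩
      rw [← List.append_assoc]
      rw [pvDedup_append_singleton (q ++ r) v]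
      by_cases h : v ∈ q ++ r
      · exact ⟨X, by rw [if_pos h, hX]⟩
      · exact ⟨X ++ [v], by rw [if_neg h, hX, List.append_assoc]⟩

-- B's rank dictionary, characterized
def pvRankDict (l : List (Int × Int)) : PySem.Dict Int Int :=
  l.foldl (fun d p =>
      if !(PySem.Dict.contains d p.1) then PySem.Dict.insert d p.1 ((PySem.Dict.size d : Int) + 1)
      else d) PySem.Dict.empty

lemma pvRankDict_spec (l : List (Int × Int)) :
    ∀ v, (pvRankDict l).get? v
        = (PySem.List.index? (PySem.List.dedup (l.map Prod.fst)) v).map (fun j => (j : Int) + 1) := by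
  suffices h : ∀ (l : List (Int × Int)) (d : PySem.Dict Int Int) (q : List Int),
      (∀ v, d.get? v = (PySem.List.index? (PySem.List.dedup q) v).map (fun j => (j : Int) + 1)) →
      d.size = (PySem.List.dedup q).length →
      ∀ v, (l.foldl (fun d p =>
          if !(PySem.Dict.contains d p.1) then PySem.Dict.insert d p.1 ((PySem.Dict.size d : Int) + 1)
          else d) d).get? v
        = (PySem.List.index? (PySem.List.dedup (q ++ l.map Prod.fst)) v).map (fun j => (j : Int) + 1) by
    intro v
    unfold pvRankDict
    have := h l PySem.Dict.empty []
      (by intro w; simp [PySem.Dict.get?_empty, PySem.List.dedup, PySem.Set.ofList, PySem.List.index?])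
      (by simp [PySem.Dict.size_empty, PySem.List.dedup, PySem.Set.ofList]) v
    simpa using this
  intro l
  induction l with
  | nil => intro d q h1 _ v; simpa using h1 v
  | cons p l ih =>
      intro d q h1 h2 v
      simp only [List.foldl_cons, List.map_cons]
      have hq : q ++ p.1 :: l.map Prod.fst = (q ++ [p.1]) ++ l.map Prod.fst := by simp
      rw [hq]
      by_cases hc : PySem.Dict.contains d p.1 = true
      · have hmem : p.1 ∈ PySem.List.dedup q := by
          by_contra hm
          have hnone := (PySem.List.index?_eq_none_iff (PySem.List.dedup q) p.1).mpr hm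
          rw [PySem.Dict.contains_eq_isSome_get?, h1 p.1, hnone] at hc
          simp at hc
        have hmemq : p.1 ∈ q := (PySem.List.mem_dedup q p.1).mp hmem
        have hded : PySem.List.dedup (q ++ [p.1]) = PySem.List.dedup q := by
          rw [pvDedup_append_singleton, if_pos hmemq]
        simp only [hc, Bool.not_true, Bool.false_eq_true, if_false]
        exact ih d (q ++ [p.1]) (by rw [hded]; exact h1) (by rw [hded]; exact h2) v
      · have hnmemq : p.1 ∉ q := by
          intro hmq
          have hmem : p.1 ∈ PySem.List.dedup q := (PySem.List.mem_dedup q p.1).mpr hmq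
          rcases Option.isSome_iff_exists.mp ((PySem.List.index?_isSome_iff (PySem.List.dedup q) p.1).mpr hmem) with ⟨j, hj⟩
          rw [PySem.Dict.contains_eq_isSome_get?, h1 p.1, hj] at hc
          simp at hc
        have hded : PySem.List.dedup (q ++ [p.1]) = PySem.List.dedup q ++ [p.1] := by
          rw [pvDedup_append_singleton, if_neg hnmemq]
        simp only [hc, Bool.not_false, if_true]
        refine ih _ (q ++ [p.1]) ?_ ?_ v
        · intro w
          rw [PySem.Dict.get?_insert, hded]
          by_cases hw : w = p.1
          · subst hw
            rw [if_pos rfl, PySem.List.index?_append_singleton_self _ _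
              (fun hmem => hnmemq ((PySem.List.mem_dedup q _).mp hmem))]
            simp [h2]
          · rw [if_neg hw, h1 w]
            by_cases hwq : w ∈ PySem.List.dedup q
            · rw [PySem.List.index?_append_of_mem _ hwq]
            · rw [(PySem.List.index?_eq_none_iff _ _).mpr hwq,
                (PySem.List.index?_eq_none_iff _ _).mpr (by
                  intro hmem
                  rcases List.mem_append.mp hmem with h' | h'
                  · exact hwq h'
                  · simp at h'; exact hw h')]
        · rw [PySem.Dict.size_insert, if_neg (by simp [hc]), hded, h2]
          simp
def pvRank (vs : List Int) (i : Nat) : Int := ((PySem.List.dedup (vs.take (i+1))).length : Int)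

-- adjacent dichotomy in a key-sorted list
lemma pvMem_take_iff (Kv : Int → Int) (hinj : ∀ a b, Kv a = Kv b → a = b)
    (vs : List Int) (hmono : vs.Pairwise (fun a b => Kv a ≤ Kv b))
    (i : Nat) (hi : i + 1 < vs.length) :
    vs[i+1] ∈ vs.take (i+1) ↔ vs[i+1] = vs[i] := by
  constructor
  · intro hmem
    rcases List.mem_iff_getElem.mp hmem with ⟨j, hj, heq⟩
    have hjlen : j < i + 1 := by simp at hj; omega
    have hj' : j < vs.length := by omega
    have hgt : (vs.take (i+1))[j] = vs[j] := List.getElem_take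
    rw [hgt] at heq
    have hpw := List.pairwise_iff_getElem.mp hmono
    have h1 : Kv vs[j] ≤ Kv vs[i] := by
      rcases Nat.lt_or_ge j i with h | h
      · exact hpw j i hj' (by omega) h
      · have : j = i := by omega
        subst this; exact le_refl _
    have h2 : Kv vs[i] ≤ Kv vs[i+1] := hpw i (i+1) (by omega) hi (by omega)
    have : Kv vs[i] = Kv vs[i+1] := by
      have := heq ▸ h1
      omega
    exact (hinj _ _ this).symm
  · intro h
    rw [h]
    have hi' : i < (vs.take (i+1)).length := by simp; omega
    have hgt : (vs.take (i+1))[i] = vs[i] := List.getElem_take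
    exact hgt ▸ List.getElem_mem hi'

lemma pvTake_succ_eq (vs : List Int) (i : Nat) (hi : i < vs.length) :
    vs.take (i+1) = vs.take i ++ [vs[i]] := by
  rw [List.take_succ]
  simp [List.getElem?_eq_getElem hi]

lemma pvRank_zero (vs : List Int) (h : 0 < vs.length) : pvRank vs 0 = 1 := by
  unfold pvRank
  rw [pvTake_succ_eq vs 0 h]
  simp [PySem.List.dedup, PySem.Set.ofList, PySem.Set.add]

-- last-of-dedup invariant along the sorted list
lemma pvIndex_take (Kv : Int → Int) (hinj : ∀ a b, Kv a = Kv b → a = b)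
    (vs : List Int) (hmono : vs.Pairwise (fun a b => Kv a ≤ Kv b)) :
    ∀ i (hi : i < vs.length),
      PySem.List.index? (PySem.List.dedup (vs.take (i+1))) vs[i]
        = some ((PySem.List.dedup (vs.take (i+1))).length - 1)
      ∧ 1 ≤ (PySem.List.dedup (vs.take (i+1))).length := by
  intro i
  induction i with
  | zero =>
      intro hi
      rw [pvTake_succ_eq vs 0 hi]
      simp only [List.take_zero, List.nil_append]
      constructor
      · simpa [PySem.List.dedup, PySem.Set.ofList, PySem.Set.add] using
          PySem.List.index?_cons_self (vs[0]) []
      · simp [PySem.List.dedup, PySem.Set.ofList, PySem.Set.add]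
  | succ i ih =>
      intro hi
      rcases ih (by omega) with ⟨ih1, ih2⟩
      have hsplit : vs.take (i+2) = vs.take (i+1) ++ [vs[i+1]] := pvTake_succ_eq vs (i+1) hi
      by_cases hmem : vs[i+1] ∈ vs.take (i+1)
      · have heqv : vs[i+1] = vs[i] := (pvMem_take_iff Kv hinj vs hmono i hi).mp hmem
        have hded : PySem.List.dedup (vs.take (i+2)) = PySem.List.dedup (vs.take (i+1)) := by
          rw [hsplit, pvDedup_append_singleton, if_pos hmem]
        rw [hded, heqv]
        exact ⟨ih1, ih2⟩
      · have hded : PySem.List.dedup (vs.take (i+2))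
            = PySem.List.dedup (vs.take (i+1)) ++ [vs[i+1]] := by
          rw [hsplit, pvDedup_append_singleton, if_neg hmem]
        rw [hded]
        constructor
        · rw [PySem.List.index?_append_singleton_self _ _
            (fun hc => hmem ((PySem.List.mem_dedup _ _).mp hc))]
          simp
        · simp

-- global index of vs[i] in dedup vs
lemma pvIndex_global (Kv : Int → Int) (hinj : ∀ a b, Kv a = Kv b → a = b)
    (vs : List Int) (hmono : vs.Pairwise (fun a b => Kv a ≤ Kv b))
    (i : Nat) (hi : i < vs.length) :
    PySem.List.index? (PySem.List.dedup vs) vs[i]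
      = some ((PySem.List.dedup (vs.take (i+1))).length - 1) := by
  rcases pvIndex_take Kv hinj vs hmono i hi with ⟨h1, h2⟩
  rcases pvDedup_prefix (vs.take (i+1)) (vs.drop (i+1)) with ⟨X, hX⟩
  rw [List.take_append_drop] at hX
  have hmem : vs[i] ∈ PySem.List.dedup (vs.take (i+1)) := by
    have := PySem.List.index?_isSome_iff (PySem.List.dedup (vs.take (i+1))) vs[i]
    rw [h1] at this
    simpa using this.mp rfl
  rw [hX, PySem.List.index?_append_of_mem _ hmem, h1]

-- rank step relations used by the A-side loop
lemma pvRank_succ_eq (Kv : Int → Int) (hinj : ∀ a b, Kv a = Kv b → a = b)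
    (vs : List Int) (hmono : vs.Pairwise (fun a b => Kv a ≤ Kv b))
    (i : Nat) (hi : i + 1 < vs.length) :
    pvRank vs (i+1) = if vs[i+1] = vs[i] then pvRank vs i else pvRank vs i + 1 := by
  unfold pvRank
  have hsplit : vs.take (i+2) = vs.take (i+1) ++ [vs[i+1]] := pvTake_succ_eq vs (i+1) hi
  by_cases h : vs[i+1] = vs[i]
  · have hmem : vs[i+1] ∈ vs.take (i+1) := (pvMem_take_iff Kv hinj vs hmono i hi).mpr h
    rw [if_pos h, hsplit, pvDedup_append_singleton, if_pos hmem]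
  · have hmem : vs[i+1] ∉ vs.take (i+1) := fun hc => h ((pvMem_take_iff Kv hinj vs hmono i hi).mp hc)
    rw [if_neg h, hsplit, pvDedup_append_singleton, if_neg hmem]
    simp
lemma pvALoop (Kv : Int → Int) (hinj : ∀ a b, Kv a = Kv b → a = b)
    (vs ids : List Int) (hmono : vs.Pairwise (fun a b => Kv a ≤ Kv b)) (hn : 1 ≤ vs.length) :
    ∀ t, t ≤ vs.length - 1 →
      ((List.range t).foldl (fun (acc : List (List Int) × Int) t =>
        let i := t + 1
        let res := acc.1
        let otnjat := acc.2
        if vs.getD i 0 = vs.getD (i-1) 0 then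
          if (i : Int) - 1 ≥ 0 then
            (res ++ [[(res.getD (i-1) []).getD 0 0, ids.getD i 0]], otnjat + 1)
          else
            (res ++ [[(i : Int) - otnjat, ids.getD i 0]], otnjat)
        else
          (res ++ [[(i : Int) + 1 - otnjat, ids.getD i 0]], otnjat)) ([[1, ids.getD 0 0]], 0))
      = ((List.range (t+1)).map (fun i => [pvRank vs i, ids.getD i 0]), ((t:Int)+1) - pvRank vs t) := by
  intro t
  induction t with
  | zero =>
      intro _
      simp [pvRank_zero vs (by omega)]
  | succ t ih =>
      intro ht
      rw [List.range_succ, List.foldl_append, ih (by omega), List.foldl_cons, List.foldl_nil]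
      have hti : t + 1 < vs.length := by omega
      have hg1 : vs.getD (t+1) 0 = vs[t+1] := List.getD_eq_getElem vs 0 hti
      have hg0 : vs.getD (t+1-1) 0 = vs[t] := by
        simpa using List.getD_eq_getElem vs 0 (by omega : t < vs.length)
      have hres : ((List.range (t+1)).map (fun i => [pvRank vs i, ids.getD i 0])).getD (t+1-1) []
          = [pvRank vs t, ids.getD t 0] := by
        have hlt : t < ((List.range (t+1)).map (fun i => [pvRank vs i, ids.getD i 0])).length := by
          simp
        simpa using List.getD_eq_getElem _ [] hlt
      have hstep := pvRank_succ_eq Kv hinj vs hmono t hti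
      simp only [hg1, hg0, hres]
      by_cases heq : vs[t+1] = vs[t]
      · rw [if_pos heq, if_pos (by push_cast; omega)]
        rw [if_pos heq] at hstep
        simp only [Prod.mk.injEq]
        refine ⟨?_, ?_⟩
        · rw [List.range_succ (n := t+1), List.map_append]
          simp [hstep]
        · rw [hstep]
          push_cast
          ring
      · rw [if_neg heq]
        rw [if_neg heq] at hstep
        have harith : ((t:Int)+1) + 1 - ((t:Int) + 1 - pvRank vs t) = pvRank vs t + 1 := by ring
        simp only [Prod.mk.injEq]
        refine ⟨?_, ?_⟩
        · rw [List.range_succ (n := t+1), List.map_append]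
          push_cast
          simp [hstep, harith]
        · rw [hstep]
          push_cast
          ring


-- ---- direction unification and glue ----

def pvKv (inverse : Bool) (v : Int) : Int := if inverse then v else -v
def pvKp (inverse : Bool) (p : Int × Int) : Int := pvKv inverse p.1

lemma pvKv_inj (inv : Bool) : ∀ a b, pvKv inv a = pvKv inv b → a = b := by
  intro a b; cases inv <;> simp [pvKv] <;> omega

lemma pvCnd_eq (inv : Bool) : pvCnd inv = pvCU (pvKp inv) := by
  funext a b
  cases inv <;> simp [pvCnd, pvCU, pvKp, pvKv, decide_eq_decide] <;> omega

lemma pvSorted_dir (inv : Bool) (z : List (Int × Int)) :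
    PySem.List.sorted z (fun p => p.1) (!inv) = PySem.List.sorted z (pvKp inv) false := by
  cases inv
  · rw [Bool.not_false, PySem.List.sorted_rev_eq_foldl_insertBy, PySem.List.sorted_eq_foldl_insertBy]
    congr 1
    funext acc x
    congr 1
    funext a b
    simp only [pvKp, pvKv, Bool.false_eq_true, if_false, decide_eq_decide]
    omega
  · rfl

lemma pvIter_succ' {α : Type} (f : α → α) (k : Nat) (x : α) :
    pvIter f (k+1) x = f (pvIter f k x) := by
  induction k generalizing x with
  | zero => rfl
  | succ k ih => exact ih (f x)

lemma pvZip_snd (sm il : List Int) (h : sm.length ≤ il.length) :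
    (sm.zip il).map Prod.snd = il.take sm.length := by
  apply List.ext_getElem
  · simp
  · intro i hi1 hi2
    simp only [List.getElem_map, List.getElem_zip, List.getElem_take]

lemma pvPstep_length (inv : Bool) (z : List (Int × Int)) (j : Nat) :
    (pvPstep inv z j).length = z.length := by
  unfold pvPstep; split <;> simp

lemma pvFold_repr (inv : Bool) : ∀ (js : List Nat) (z : List (Int × Int)) (rest : List Int),
    (∀ j ∈ js, j + 1 < z.length) →
    js.foldl (lsStep inv) (z.map Prod.fst, z.map Prod.snd ++ rest)
      = ((js.foldl (pvPstep inv) z).map Prod.fst, (js.foldl (pvPstep inv) z).map Prod.snd ++ rest) := by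
  intro js
  induction js with
  | nil => intro z rest _; rfl
  | cons j js ih =>
      intro z rest h
      rw [List.foldl_cons, lsStep_repr inv z rest j (h j (by simp)), List.foldl_cons]
      exact ih (pvPstep inv z j) rest
        (fun j' hj' => by rw [pvPstep_length]; exact h j' (List.mem_cons_of_mem j hj'))

lemma pvOuter (inv : Bool) (n0 : Nat) :
    ∀ (k : Nat) (z : List (Int × Int)) (rest : List Int), z.length = n0 →
    (List.range k).foldl (fun st _ => (List.range (n0-1)).foldl (lsStep inv) st)
        (z.map Prod.fst, z.map Prod.snd ++ rest)
      = ((pvIter (pvSweep (pvCnd inv)) k z).map Prod.fst,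
         (pvIter (pvSweep (pvCnd inv)) k z).map Prod.snd ++ rest) := by
  intro k
  induction k with
  | zero => intro z rest _; rfl
  | succ k ih =>
      intro z rest hz
      rw [List.range_succ, List.foldl_append, ih z rest hz, List.foldl_cons, List.foldl_nil]
      have hw : (pvIter (pvSweep (pvCnd inv)) k z).length = n0 :=
        (pvIter_perm (pvCnd inv) k z).length_eq.trans hz
      rw [pvFold_repr inv _ _ rest (fun j hj => by rw [hw]; simp [List.mem_range] at hj; omega)]
      have h1 : (List.range (n0-1)).foldl (pvPstep inv) (pvIter (pvSweep (pvCnd inv)) k z)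
          = pvSweep (pvCnd inv) (pvIter (pvSweep (pvCnd inv)) k z) := by
        have := pvFold_range inv (pvIter (pvSweep (pvCnd inv)) k z)
        rwa [hw] at this
      rw [h1, pvIter_succ']

-- ===== VERDICT (by name: the statement is the Claim_ definition above) =====
theorem l_sort_spec : Claim_unchanged_l_sort := by
  unfold Claim_unchanged_l_sort
  intro sm il inv _ hpre hnd
  unfold D_l_sort at hnd
  obtain ⟨hil, hle⟩ := hpre
  have hne : sm ≠ [] := hnd
  have hn1 : 1 ≤ sm.length := List.length_pos_iff.mpr hne
  set n0 := sm.length with hn0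
  set z := sm.zip il with hz
  have hzlen : z.length = n0 := by rw [hz, List.length_zip]; omega
  have hfst : z.map Prod.fst = sm := List.map_fst_zip hle
  have hsnd : z.map Prod.snd ++ il.drop n0 = il := by
    rw [hz, pvZip_snd sm il hle]; exact List.take_append_drop n0 il
  set P := PySem.List.sorted z (fun p => p.1) (!inv) with hP
  have hPK : P = PySem.List.sorted z (pvKp inv) false := by rw [hP, pvSorted_dir]
  have hPlen : P.length = n0 := by
    rw [hP, PySem.List.length_sorted]; exact hzlen
  have hbubble : pvIter (pvSweep (pvCnd inv)) n0 z = P := by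
    rw [pvCnd_eq, hPK, ← hzlen]
    exact pvMaster (pvKp inv) z
  have hstate : (List.range n0).foldl (fun st _ => (List.range (n0-1)).foldl (lsStep inv) st) (sm, il)
      = (P.map Prod.fst, P.map Prod.snd ++ il.drop n0) := by
    conv_lhs => rw [← hfst, ← hsnd]
    rw [pvOuter inv n0 n0 z (il.drop n0) hzlen, hbubble]
  have hvslen : (P.map Prod.fst).length = n0 := by simp [hPlen]
  have hmono : (P.map Prod.fst).Pairwise (fun a b => pvKv inv a ≤ pvKv inv b) := by
    refine List.pairwise_map.mpr ?_
    rw [hPK]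
    exact PySem.List.sorted_pairwise z (pvKp inv)
  -- A's value
  have hA : l_sort sm il inv
      = (List.range n0).map (fun i =>
          [pvRank (P.map Prod.fst) i, (P.map Prod.snd ++ il.drop n0).getD i 0]) := by
    show ((List.range (sm.length - 1)).foldl _
        ([[1, (((List.range sm.length).foldl
            (fun st _ => (List.range (sm.length-1)).foldl (lsStep inv) st) (sm, il)).2).getD 0 0]], 0)).1 = _
    rw [← hn0, hstate]
    have := pvALoop (pvKv inv) (pvKv_inj inv) (P.map Prod.fst) (P.map Prod.snd ++ il.drop n0)
      hmono (by omega) (n0 - 1) (by rw [hvslen])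
    have h1 := congrArg Prod.fst this
    rw [h1]
    have hone : n0 - 1 + 1 = n0 := by omega
    rw [hone]
  -- B's value
  have hB : l_sort_alt sm il inv
      = (List.range n0).map (fun i =>
          [pvRank (P.map Prod.fst) i, (P.map Prod.snd ++ il.drop n0).getD i 0]) := by
    show P.map (fun p => [PySem.Dict.getD (pvRankDict P) p.1 0, p.2]) = _
    apply List.ext_getElem
    · simp [hPlen]
    · intro i hi1 hi2
      have hin : i < n0 := by simpa [hPlen] using hi1
      have hiv : i < (P.map Prod.fst).length := by omega
      have hfsti : (P.map Prod.fst)[i] = P[i].1 := List.getElem_map ..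
      rcases pvIndex_take (pvKv inv) (pvKv_inj inv) (P.map Prod.fst) hmono i hiv with ⟨_, hlen1⟩
      have hidx := pvIndex_global (pvKv inv) (pvKv_inj inv) (P.map Prod.fst) hmono i hiv
      have hrank : PySem.Dict.getD (pvRankDict P) P[i].1 0 = pvRank (P.map Prod.fst) i := by
        rw [PySem.Dict.getD_eq_get?_getD, pvRankDict_spec P, ← hfsti, hidx]
        unfold pvRank
        generalize hm : (PySem.List.dedup ((P.map Prod.fst).take (i+1))).length = m at hlen1 ⊢
        show ((m - 1 : Nat) : Int) + 1 = (m : Int)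
        omega
      have hids : (P.map Prod.snd ++ il.drop n0).getD i 0 = P[i].2 := by
        rw [List.getD_append _ _ _ _ (by simpa [hPlen] using hin)]
        have : i < (P.map Prod.snd).length := by simpa [hPlen] using hin
        rw [List.getD_eq_getElem _ _ this, List.getElem_map]
      simp only [List.getElem_map, List.getElem_range, hrank, hids]
  rw [hA, hB]

theorem l_sort_changed : Claim_changed_l_sort := by
  unfold Claim_changed_l_sort
  decide

theorem l_sort_tight : Claim_exact_l_sort := by
  unfold Claim_exact_l_sort
  intro sm il inv _ _ hd
  subst hd
  intro h
  simp [l_sort, l_sort_alt, PySem.List.sorted] at h
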